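-- pv_equiv track=rewrite | github.com/anjmhrjn/agentic-rag | evaluation/metrics.py | rank_of_best_source
-- ===== SOURCE A (Python) =====
-- from typing import List, Dict, Set
--
-- def rank_of_best_source(retrieved_sources: List[str],
--                        expected_sources: List[str]) -> int:
--     """
--     What rank (1-indexed) is the first expected source?
--     Lower is better. Returns -1 if not found.
--     """
--     if not expected_sources:
--         return 1
--
--     expected_set = set(expected_sources)
--
--     for rank, source in enumerate(retrieved_sources, start=1):
--         if source in expected_set:
--             return rank
--
--     return -1  # Not found
-- ===== SOURCE B (Python) =====
-- def rank_of_best_source(retrieved_sources, expected_sources):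
--     if not expected_sources:
--         return 1
--
--     first_rank = {}
--     for rank, source in enumerate(retrieved_sources, start=1):
--         first_rank.setdefault(source, rank)
--
--     ranks = [first_rank[s] for s in expected_sources if s in first_rank]
--     return min(ranks) if ranks else -1
-- ===== Notes on version B (the rewrite author's own statement) =====
-- stated objective: alternative
-- what changed: Instead of scanning retrieved_sources once against a membership set of expected_sources, B builds a first-rank position table over retrieved_sources and takes the minimum of the ranks found for expected_sources.
import Mathlib
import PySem

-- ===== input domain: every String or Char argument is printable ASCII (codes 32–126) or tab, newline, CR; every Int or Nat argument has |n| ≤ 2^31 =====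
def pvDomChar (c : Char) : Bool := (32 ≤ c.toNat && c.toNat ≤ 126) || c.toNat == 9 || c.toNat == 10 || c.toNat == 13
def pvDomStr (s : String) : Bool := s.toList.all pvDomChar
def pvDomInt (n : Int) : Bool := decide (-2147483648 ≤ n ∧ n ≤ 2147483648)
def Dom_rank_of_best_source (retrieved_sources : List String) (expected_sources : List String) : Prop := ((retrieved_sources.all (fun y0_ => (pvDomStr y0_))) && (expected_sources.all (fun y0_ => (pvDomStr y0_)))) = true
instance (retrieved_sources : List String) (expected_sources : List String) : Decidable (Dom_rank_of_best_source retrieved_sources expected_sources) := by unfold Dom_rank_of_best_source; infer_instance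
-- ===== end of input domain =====

-- B replaces A's single scan of retrieved_sources against a membership set by a
-- first-rank position table over retrieved_sources plus a minimum over the ranks
-- of the expected sources (alternative decomposition, same cost).

-- ===== PORT A =====
-- the 'for rank, source in enumerate(retrieved_sources, 1): if source in expected_set: return rank' loop
def rankLoopA : List (Int × String) → PySem.Set String → Int
  | [], _ => -1
  | (rank, source) :: rest, es =>
      if PySem.Set.contains es source then rank else rankLoopA rest es

def rank_of_best_source (retrieved_sources : List String) (expected_sources : List String) : Int :=
  if expected_sources = [] then 1
  else
    let expected_set := PySem.Set.ofList expected_sources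
    rankLoopA (PySem.List.enumerate retrieved_sources 1) expected_set

-- ===== PORT B =====
def rank_of_best_source_alt (retrieved_sources : List String) (expected_sources : List String) : Int :=
  if expected_sources = [] then 1
  else
    let first_rank : PySem.Dict String Int :=
      (PySem.List.enumerate retrieved_sources 1).foldl
        (fun d p => d.setdefault p.2 p.1) PySem.Dict.empty
    let ranks := expected_sources.filterMap (fun s => first_rank.get? s)
    match PySem.List.min? ranks (fun x => x) with
    | some m => m
    | none => -1

-- ===== PRECONDITION & SPEC =====
def Spec_rank_of_best_source (retrieved_sources : List String) (expected_sources : List String) (out : Int) : Prop := out = rank_of_best_source_alt retrieved_sources expected_sources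
instance (retrieved_sources : List String) (expected_sources : List String) (out : Int) : Decidable (Spec_rank_of_best_source retrieved_sources expected_sources out) := by unfold Spec_rank_of_best_source; infer_instance

-- ===== CLAIM (what is proved, stated in full; the proofs are below) =====
def Claim_equal_rank_of_best_source : Prop := ∀ (retrieved_sources : List String) (expected_sources : List String), Dom_rank_of_best_source retrieved_sources expected_sources → Spec_rank_of_best_source retrieved_sources expected_sources (rank_of_best_source retrieved_sources expected_sources)

-- ===== LEMMAS AND PROOFS =====

-- A's loop is the first index (1-offset by k) whose element is in the set.
theorem rankLoopA_eq_findIdx? (r : List String) (es : PySem.Set String) (k : Int) :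
    rankLoopA (PySem.List.enumerate r k) es =
      match List.findIdx? (fun s => PySem.Set.contains es s) r with
      | some i => k + (i : Int)
      | none => -1 := by
  induction r generalizing k with
  | nil => simp [PySem.List.enumerate_nil, rankLoopA]
  | cons x rest ih =>
    rw [PySem.List.enumerate_cons]
    by_cases hx : x ∈ es
    · simp [rankLoopA, List.findIdx?_cons, hx]
    · simp [rankLoopA, List.findIdx?_cons, hx, ih (k + 1)]
      cases List.findIdx? (fun s => decide (s ∈ es)) rest with
      | none => rfl
      | some i => simp; ring

-- B's setdefault loop: lookups in the built table are first-occurrence indices.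
theorem get?_setdefault_loop (r : List String) (k : Int) (d : PySem.Dict String Int)
    (s : String) :
    ((PySem.List.enumerate r k).foldl (fun d p => d.setdefault p.2 p.1) d).get? s =
      match d.get? s with
      | some v => some v
      | none => (List.idxOf? s r).map (fun i => k + (i : Int)) := by
  induction r generalizing k d with
  | nil =>
    rw [PySem.List.enumerate_nil]
    cases h : d.get? s <;> simp [h]
  | cons x rest ih =>
    rw [PySem.List.enumerate_cons]
    simp only [List.foldl_cons, ih (k + 1), List.idxOf?_cons]
    by_cases hxs : x = s
    · subst hxs
      rw [PySem.Dict.get?_setdefault_self]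
      cases d.get? x <;> simp
    · have hget : (d.setdefault x k).get? s = d.get? s := by
        unfold PySem.Dict.setdefault
        split
        · rfl
        next hc =>
          have hc' : d.contains x = false := by revert hc; cases d.contains x <;> simp
          have he : PySem.Dict.mk (d.items ++ [(x, k)]) = d.insert x k := by
            simp [PySem.Dict.insert, hc']
          rw [he]
          exact PySem.Dict.get?_insert_of_ne d k (fun h => hxs h.symm)
      rw [hget]
      have hbeq : (x == s) = false := by simp [hxs]
      rw [hbeq]
      simp only [Bool.false_eq_true, if_false]
      cases d.get? s with
      | some v => rfl
      | none =>
        cases List.idxOf? s rest with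
        | none => rfl
        | some i => simp; ring

-- membership in A's set is membership in expected_sources
theorem contains_ofList_iff (e : List String) (s : String) :
    PySem.Set.contains (PySem.Set.ofList e) s = true ↔ s ∈ e := by
  rw [PySem.Set.contains_iff, PySem.Set.mem_ofList]

theorem main_eq (r e : List String) :
    rank_of_best_source r e = rank_of_best_source_alt r e := by
  by_cases he : e = []
  · simp [rank_of_best_source, rank_of_best_source_alt, he]
  · unfold rank_of_best_source rank_of_best_source_alt
    rw [if_neg he, if_neg he]
    rw [rankLoopA_eq_findIdx?]
    show _ = (match PySem.List.min? (e.filterMap (fun s =>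
        ((PySem.List.enumerate r 1).foldl (fun d p => d.setdefault p.2 p.1)
          PySem.Dict.empty).get? s)) (fun x => x) with
      | some m => m
      | none => -1)
    have hranks : (e.filterMap (fun s =>
        ((PySem.List.enumerate r 1).foldl (fun d p => d.setdefault p.2 p.1)
          PySem.Dict.empty).get? s)) =
        e.filterMap (fun s => (List.idxOf? s r).map (fun i => 1 + (i : Int))) := by
      apply List.filterMap_congr
      intro s _
      rw [get?_setdefault_loop, PySem.Dict.get?_empty]
    rw [hranks]
    set p := fun s => PySem.Set.contains (PySem.Set.ofList e) s with hp
    cases hfind : List.findIdx? p r with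
    | none =>
      -- no retrieved source is expected → every expected source is absent from r
      have hnone : ∀ s ∈ e, List.idxOf? s r = none := by
        intro s hs
        rw [List.idxOf?_eq_none_iff]
        intro hmem
        have hcf := (List.findIdx?_eq_none_iff.mp hfind) s hmem
        have htr : (PySem.Set.ofList e).contains s = true :=
          (contains_ofList_iff e s).mpr hs
        rw [hp] at hcf
        simp only [htr] at hcf
        exact Bool.noConfusion hcf
      have : e.filterMap (fun s => (List.idxOf? s r).map (fun i => 1 + (i : Int))) = [] := by
        apply List.filterMap_eq_nil_iff.mpr
        intro s hs
        rw [hnone s hs]; rfl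
      rw [this]
      rfl
    | some i =>
      obtain ⟨hi, hpi, hmin⟩ := List.findIdx?_eq_some_iff_getElem.mp hfind
      have hri : r[i] ∈ e := (contains_ofList_iff e r[i]).mp hpi
      have hnotbefore : ∀ j (hj : j < i), r[j]'(by omega) ∉ e := by
        intro j hj hmem
        exact hmin j hj ((contains_ofList_iff e _).mpr hmem)
      set ranks := e.filterMap (fun s => (List.idxOf? s r).map (fun i => 1 + (i : Int)))
        with hrk
      have hmem : (1 + (i : Int)) ∈ ranks := by
        rw [hrk, List.mem_filterMap]
        refine ⟨r[i], hri, ?_⟩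
        have hidx : List.idxOf? r[i] r = some i := by
          rw [List.idxOf?_eq_some_iff]
          refine ⟨hi, rfl, ?_⟩
          intro j hj heq
          exact hnotbefore j hj (heq ▸ hri)
        rw [hidx]; rfl
      have hle : ∀ x ∈ ranks, (1 + (i : Int)) ≤ x := by
        intro x hx
        rw [hrk, List.mem_filterMap] at hx
        obtain ⟨s, hs, hmap⟩ := hx
        cases hidx : List.idxOf? s r with
        | none => rw [hidx] at hmap; exact absurd hmap (by simp)
        | some j =>
          rw [hidx] at hmap
          simp at hmap
          obtain ⟨hjlt, hrj, -⟩ := List.idxOf?_eq_some_iff.mp hidx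
          have hij : i ≤ j := by
            by_contra hlt
            exact hnotbefore j (by omega) (hrj ▸ hs)
          rw [← hmap]
          have : (i : Int) ≤ (j : Int) := by exact_mod_cast hij
          omega
      cases hmq : PySem.List.min? ranks (fun x => x) with
      | none =>
        exact absurd ((PySem.List.min?_eq_none_iff ranks _).mp hmq)
          (List.ne_nil_of_mem hmem)
      | some m =>
        have hm1 : m ≤ 1 + (i : Int) := by
          simpa using PySem.List.min?_isMin hmq _ hmem
        have hm2 := hle m (PySem.List.min?_mem hmq)
        show (1 + (i : Int)) = m
        omega

-- ===== VERDICT (by name: the statement is the Claim_ definition above) =====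
theorem rank_of_best_source_spec : Claim_equal_rank_of_best_source := by
  intro r e _
  unfold Spec_rank_of_best_source
  exact main_eq r e
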